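-- pv_equiv track=rewrite | github.com/Aasthaengg/IBMdataset | Python_codes/p03762/s585542729.py | sum_length
-- ===== SOURCE A (Python) =====
-- def sum_length(x, n):
--     all_sum = 0
--     prev_sum = 0
--     for i in range(1, n):
--         cur_sum = prev_sum + (x[i] - x[i-1]) * i
--         all_sum = all_sum + cur_sum
--         prev_sum = cur_sum
--     return all_sum
-- ===== SOURCE B (Python) =====
-- def sum_length(x, n):
--     # Each element x[j] of the first n elements contributes once with the
--     # closed-form coefficient (2*j - n + 1), obtained by expanding A's nested
--     # prefix sums and collecting the coefficient of each element.
--     return sum(v * (2 * j - n + 1) for j, v in enumerate(x[:max(0, n)]))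
-- ===== Notes on version B (the rewrite author's own statement) =====
-- stated objective: simpler
-- what changed: B drops A's running prev_sum/cur_sum accumulator pair and the difference terms entirely: it makes one enumerate pass over the first n elements, each element contributing once with the closed-form coefficient 2*j - n + 1 obtained by expanding A's nested prefix sums and collecting each element's coefficient.
import Mathlib
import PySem

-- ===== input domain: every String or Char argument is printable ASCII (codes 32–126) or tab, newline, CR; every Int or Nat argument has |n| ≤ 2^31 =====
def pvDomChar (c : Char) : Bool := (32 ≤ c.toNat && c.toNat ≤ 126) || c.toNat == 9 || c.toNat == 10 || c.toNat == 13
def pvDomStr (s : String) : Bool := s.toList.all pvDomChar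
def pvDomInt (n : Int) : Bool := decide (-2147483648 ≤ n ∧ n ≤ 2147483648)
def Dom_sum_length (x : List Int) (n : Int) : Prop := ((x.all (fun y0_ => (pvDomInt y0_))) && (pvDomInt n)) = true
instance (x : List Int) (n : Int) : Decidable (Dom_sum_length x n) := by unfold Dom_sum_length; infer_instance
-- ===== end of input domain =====

-- B replaces A's running prefix-sum accumulator pair by a single enumerate pass over the
-- first n elements, each contributing once with the closed-form coefficient 2*j - n + 1;
-- objective: simpler.

-- ===== PORT A =====
-- A's loop carries the pair (all_sum, prev_sum); x[i] is in range under Pre_.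
def sum_length (x : List Int) (n : Int) : Int :=
  ((PySem.List.pyRange 1 n 1).foldl
    (fun (s : Int × Int) i =>
      let cur := s.2 + (PySem.List.pyGetD x i 0 - PySem.List.pyGetD x (i - 1) 0) * i
      (s.1 + cur, cur))
    (0, 0)).1

-- ===== PORT B =====
-- sum(v * (2*j - n + 1) for j, v in enumerate(x[:max(0, n)]))
def sum_length_alt (x : List Int) (n : Int) : Int :=
  ((PySem.List.enumerate (PySem.List.slice x none (some (max 0 n))) 0).map
    (fun jv => jv.2 * (2 * jv.1 - n + 1))).sum

-- ===== PRECONDITION & SPEC =====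
-- A raises IndexError when the loop runs past the list (n ≥ 2 and n > len x); Pre_ excludes exactly that.
def Pre_sum_length (x : List Int) (n : Int) : Prop := n ≤ x.length ∨ n ≤ 1
instance (x : List Int) (n : Int) : Decidable (Pre_sum_length x n) := by unfold Pre_sum_length; infer_instance
def pvWitness_sum_length : List Int × Int := ([1, 3, 6], 3)

def Spec_sum_length (x : List Int) (n : Int) (out : Int) : Prop := out = sum_length_alt x n
instance (x : List Int) (n : Int) (out : Int) : Decidable (Spec_sum_length x n out) := by unfold Spec_sum_length; infer_instance

-- ===== CLAIM (what is proved, stated in full; the proofs are below) =====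
def Claim_equal_sum_length : Prop := ∀ (x : List Int) (n : Int), Dom_sum_length x n → Pre_sum_length x n → Spec_sum_length x n (sum_length x n)

-- ===== LEMMAS AND PROOFS =====

-- Shorthand (proof-only): the weighted-difference sum obtained from A by swapping its
-- double summation, and B's per-element coefficient sum over a prefix.
def wsum (x : List Int) (n m : Int) : Int :=
  ((PySem.List.pyRange 1 m 1).map
    (fun i => (PySem.List.pyGetD x i 0 - PySem.List.pyGetD x (i - 1) 0) * i * (n - i))).sum

def csum (x : List Int) (n : Int) (m : Nat) : Int :=
  ((PySem.List.enumerate (x.take m) 0).map (fun jv => jv.2 * (2 * jv.1 - n + 1))).sum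

-- Invariant relating A's pair-state fold to the weighted-difference sum,
-- for every prefix range(1, m): all_sum = wsum - (n - m) * prev_sum.
theorem sum_length_key (x : List Int) (n : Int) (m : Nat) :
    ((PySem.List.pyRange 1 (m : Int) 1).foldl
      (fun (s : Int × Int) i =>
        let cur := s.2 + (PySem.List.pyGetD x i 0 - PySem.List.pyGetD x (i - 1) 0) * i
        (s.1 + cur, cur))
      (0, 0)).1
    = wsum x n m
      - (n - m) *
        ((PySem.List.pyRange 1 (m : Int) 1).foldl
          (fun (s : Int × Int) i =>
            let cur := s.2 + (PySem.List.pyGetD x i 0 - PySem.List.pyGetD x (i - 1) 0) * i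
            (s.1 + cur, cur))
          (0, 0)).2 := by
  induction m with
  | zero => simp [wsum, PySem.List.pyRange_one_eq_nil]
  | succ m ih =>
      rcases Nat.eq_zero_or_pos m with hm | hm
      · subst hm
        have : PySem.List.pyRange 1 ((0+1 : Nat) : Int) 1 = [] :=
          PySem.List.pyRange_one_eq_nil (by norm_num)
        rw [wsum, this]
        simp
      · have h1 : (1 : Int) ≤ (m : Int) := by exact_mod_cast hm
        rw [wsum, show ((m + 1 : Nat) : Int) = (m : Int) + 1 by push_cast; ring,
            PySem.List.pyRange_one_succ_right h1]
        simp only [List.foldl_append, List.foldl_cons, List.foldl_nil,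
          List.map_append, List.sum_append, List.map_cons, List.map_nil, List.sum_cons,
          List.sum_nil]
        set SA := (PySem.List.pyRange 1 (m : Int) 1).foldl
          (fun (s : Int × Int) i =>
            let cur := s.2 + (PySem.List.pyGetD x i 0 - PySem.List.pyGetD x (i - 1) 0) * i
            (s.1 + cur, cur)) (0, 0) with hSA
        rw [wsum] at ih
        simp only [hSA] at ih ⊢
        rw [ih]; ring

-- One more element in B's prefix sum: the element x[m] joins with coefficient 2*m - n + 1.
theorem csum_succ (x : List Int) (n : Int) (m : Nat) (hm : m < x.length) :
    csum x n (m + 1) = csum x n m + x[m] * (2 * (m : Int) - n + 1) := by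
  unfold csum
  rw [List.take_add_one, List.getElem?_eq_getElem hm, Option.toList_some,
    PySem.List.enumerate_append, List.map_append, List.sum_append,
    PySem.List.enumerate_cons, PySem.List.enumerate_nil]
  simp [Nat.min_eq_left (Nat.le_of_lt hm)]

-- Core: the weighted-difference sum over range(1, m+1) equals B's coefficient sum over the
-- first m elements plus the last element's partial weight m*(n-m).
theorem wsum_eq_csum (x : List Int) (n : Int) (m : Nat) (hm : m < x.length) :
    wsum x n ((m : Int) + 1) = csum x n m + x[m] * (m : Int) * (n - (m : Int)) := by
  induction m with
  | zero =>
      rw [wsum, show ((0 : Nat) : Int) + 1 = 1 by norm_num,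
        PySem.List.pyRange_one_eq_nil (by norm_num)]
      simp [csum]
  | succ m ih =>
      have hm' : m < x.length := Nat.lt_of_succ_lt hm
      have h1 : (1 : Int) ≤ (m : Int) + 1 := by omega
      rw [wsum, show ((m + 1 : Nat) : Int) + 1 = ((m : Int) + 1) + 1 by push_cast; ring,
        PySem.List.pyRange_one_succ_right h1]
      rw [List.map_append, List.sum_append]
      have hmid : wsum x n ((m : Int) + 1) = csum x n m + x[m] * (m : Int) * (n - (m : Int)) :=
        ih hm'
      rw [wsum] at hmid
      rw [hmid, csum_succ x n m hm']
      simp only [List.map_cons, List.map_nil, List.sum_cons, List.sum_nil]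
      have e1 : PySem.List.pyGetD x ((m : Int) + 1) 0 = x[m + 1] := by
        rw [show (m : Int) + 1 = ((m + 1 : Nat) : Int) by push_cast; ring,
          PySem.List.pyGetD_natCast]
        exact List.getD_eq_getElem x 0 hm
      have e2 : PySem.List.pyGetD x ((m : Int) + 1 - 1) 0 = x[m] := by
        rw [show (m : Int) + 1 - 1 = ((m : Nat) : Int) by ring,
          PySem.List.pyGetD_natCast]
        exact List.getD_eq_getElem x 0 hm'
      rw [e1, e2]
      push_cast
      ring

-- B's port, rewritten as csum (for n ≥ 0 the slice is a take).
theorem sum_length_alt_eq_csum (x : List Int) (n : Int) (hn : 0 ≤ n) :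
    sum_length_alt x n = csum x n n.toNat := by
  unfold sum_length_alt csum
  rw [show max 0 n = n by omega, PySem.List.slice_to x hn]

theorem sum_length_eq (x : List Int) (n : Int) (hpre : n ≤ x.length ∨ n ≤ 1) :
    sum_length x n = sum_length_alt x n := by
  unfold sum_length
  by_cases h : n ≤ 1
  · -- empty or single-step-free loop: A returns 0, and B's coefficient for x[0] at n = 1 is 0
    rw [PySem.List.pyRange_one_eq_nil h]
    simp only [List.foldl_nil]
    unfold sum_length_alt
    by_cases h0 : n ≤ 0
    · rw [show max 0 n = 0 by omega, PySem.List.slice_to x (le_refl 0)]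
      simp [PySem.List.enumerate_nil]
    · have hn1 : n = 1 := by omega
      subst hn1
      rw [show max 0 (1:Int) = 1 by norm_num, PySem.List.slice_to x (by norm_num)]
      cases x with
      | nil => simp [PySem.List.enumerate_nil]
      | cons a l =>
          simp [PySem.List.enumerate_cons, PySem.List.enumerate_nil]
  · have hn2 : 2 ≤ n := by omega
    have hlen : n ≤ (x.length : Int) := by
      rcases hpre with h' | h'
      · exact h'
      · omega
    set m : Nat := n.toNat - 1 with hm
    have hmn : ((m : Int)) + 1 = n := by omega
    have hmlt : m < x.length := by omega
    have hA := sum_length_key x n n.toNat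
    rw [show ((n.toNat : Nat) : Int) = n by omega] at hA
    rw [hA]
    have hw : wsum x n n = csum x n m + x[m] * (m : Int) * (n - (m : Int)) := by
      have h := wsum_eq_csum x n m hmlt
      rw [hmn] at h
      exact h
    rw [sum_length_alt_eq_csum x n (by omega),
      show n.toNat = m + 1 by omega, csum_succ x n m hmlt, hw]
    ring_nf
    rw [show (m : Int) = n - 1 by omega]
    ring

-- ===== VERDICT (by name: the statement is the Claim_ definition above) =====
theorem sum_length_spec : Claim_equal_sum_length := by
  intro x n _ hpre
  unfold Spec_sum_length
  exact sum_length_eq x n hpre
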